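-- pv_equiv track=rewrite | github.com/MarceloGouveia77/Simplex | funcoes.py | calc_restricao
-- ===== SOURCE A (Python) =====
-- def calc_pos(string):
--     tam = len(string)
--     pos = int(string[tam-1:])
--     return pos
--
-- def calc_restricao(restr):
--     restr = restr.split(" ")
--     tam = len(restr)
--     lista_aux = [None] * tam
--     lista_pos = [None] * tam
--
--     for i in range(len(restr)): # DETECTA SINAL NEGATIVO E APLICA À VARIAVEL
--         if(restr[i] == '-'):
--             tmp = restr[i+1]
--             restr[i+1] = '-' + tmp
--
--     for i in range(tam):
--         string_tmp = restr[i]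
--         if(i == tam-1):
--             lista_aux[i] = string_tmp
--             break
--         if(len(string_tmp) >= 3):
--             lista_pos[i] = calc_pos(string_tmp) # CALCULA EM QUAL POS VAI CADA VARIÁVEL
--             lista_aux[i] = string_tmp
--
--     for i in range(tam): # FILTRA APENAS OS NÚMEROS DA RESTRICAO
--         if(i == (tam - 1)):
--             break
--         if(lista_aux[i] != None):
--             pos = len(lista_aux[i]) -2
--             lista_aux[i] = lista_aux[i][:pos]
--
--     lista_aux = [x for x in lista_aux if x is not None]
--     lista_pos = [x for x in lista_pos if x is not None]
--     return lista_aux, lista_pos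
-- ===== SOURCE B (Python) =====
-- def calc_restricao(restr):
--     # Streaming parse: greedily absorb each run of '-' tokens into the token that
--     # follows it (a dangling minus token at the end still raises, as in the original), and
--     # emit through a one-token lookbehind buffer so the final token is kept whole.
--     tokens = iter(restr.split(" "))
--     lista_aux = []
--     lista_pos = []
--     pending = None
--     for t in tokens:
--         while t == '-':
--             t = '-' + next(tokens)
--         if pending is not None and len(pending) >= 3:
--             lista_aux.append(pending[:-2])
--             lista_pos.append(int(pending[-1:]))
--         pending = t
--     lista_aux.append(pending)
--     return lista_aux, lista_pos
-- ===== Notes on version B (the rewrite author's own statement) =====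
-- stated objective: simpler
-- what changed: Replaces A's three index passes over two pre-allocated None arrays (in-place sign mutation into the token list, fill-with-break, slicing pass, final None-filters) with a streaming parse over a token iterator that greedily absorbs each run of '-' tokens into the following token via next() and emits directly to the result lists through a one-token lookbehind buffer, so the last token is kept whole and '-' tokens never appear in the stream.
import Mathlib
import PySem

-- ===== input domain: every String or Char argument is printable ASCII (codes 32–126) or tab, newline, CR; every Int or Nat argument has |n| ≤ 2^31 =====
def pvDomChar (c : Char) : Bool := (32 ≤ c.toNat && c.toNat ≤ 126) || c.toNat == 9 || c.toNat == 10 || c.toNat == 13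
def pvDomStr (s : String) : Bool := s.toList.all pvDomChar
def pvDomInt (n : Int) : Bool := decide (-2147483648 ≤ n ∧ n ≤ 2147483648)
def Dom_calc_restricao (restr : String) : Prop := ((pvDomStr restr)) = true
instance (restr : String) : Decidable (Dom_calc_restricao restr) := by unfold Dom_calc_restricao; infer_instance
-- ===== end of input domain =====

-- B replaces A's three index passes over pre-allocated None arrays with a streaming parse:
-- an iterator over the tokens from which each run of '-' tokens is greedily absorbed into
-- the following token, emitting through a one-token lookbehind buffer (objective: simpler).

-- ===== PORT A =====
-- calc_pos(string): int(string[len-1:]) ; the .getD 0 default is never reached on Pre_ inputs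
-- (Python raises ValueError there, excluded by Pre_calc_restricao)
def pvCalcPos (s : List Char) : Int :=
  let tam : Int := s.length
  (PySem.Int.ofChars? (PySem.List.slice s (some (tam - 1)) none)).getD 0

-- first loop: in-place sign propagation; the write at index i+1 = len is Python's IndexError,
-- here a no-op List.set (such inputs are excluded by Pre_calc_restricao)
def pvLoop1 (l : List (List Char)) (i : Nat) : List (List Char) :=
  if _h : i < l.length then
    pvLoop1 (if l.getD i [] = ['-'] then l.set (i + 1) ('-' :: l.getD (i + 1) []) else l) (i + 1)
  else l
termination_by l.length - i
decreasing_by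
  split
  · simp only [List.length_set]; omega
  · omega

-- second loop: fill the two None arrays, break at the last index
def pvLoop2 (restr : List (List Char)) (tam i : Nat)
    (aux : List (Option (List Char))) (pos : List (Option Int)) :
    List (Option (List Char)) × List (Option Int) :=
  if _h : i < tam then
    let s := restr.getD i []
    if i = tam - 1 then (aux.set i (some s), pos)
    else if 3 ≤ s.length then
      pvLoop2 restr tam (i + 1) (aux.set i (some s)) (pos.set i (some (pvCalcPos s)))
    else pvLoop2 restr tam (i + 1) aux pos
  else (aux, pos)
termination_by tam - i

-- third loop: strip the two last characters of every non-None entry, break at the last index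
def pvLoop3 (tam i : Nat) (aux : List (Option (List Char))) : List (Option (List Char)) :=
  if _h : i < tam then
    if i = tam - 1 then aux
    else
      match aux.getD i none with
      | none => pvLoop3 tam (i + 1) aux
      | some s =>
          pvLoop3 tam (i + 1)
            (aux.set i (some (PySem.List.slice s none (some ((s.length : Int) - 2)))))
  else aux
termination_by tam - i

def calc_restricao (restr : String) : List String × List Int :=
  let restrL := PySem.Chars.splitOn restr.toList [' ']
  let tam := restrL.length
  let r2 := pvLoop2 (pvLoop1 restrL 0) tam 0 (List.replicate tam none) (List.replicate tam none)
  let aux3 := pvLoop3 tam 0 r2.1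
  ((aux3.filterMap id).map String.ofList, r2.2.filterMap id)

-- ===== PORT B =====
-- greedy absorption of a run of '-' tokens into the following token:
-- while t == '-': t = '-' + next(tokens).  Python's next() raises StopIteration when the
-- iterator is exhausted (a dangling minus token); that branch, unreachable under Pre_, yields (['-'], []).
def pvMerge (t : List Char) (rest : List (List Char)) : List Char × List (List Char) :=
  if t = ['-'] then
    match rest with
    | [] => (['-'], [])
    | u :: us => pvMerge ('-' :: u) us
  else (t, rest)
termination_by rest.length

theorem pvMerge_length (rest : List (List Char)) :
    ∀ t, (pvMerge t rest).2.length ≤ rest.length := by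
  induction rest with
  | nil =>
      intro t; rw [pvMerge]
      by_cases h : t = ['-'] <;> simp [h]
  | cons u us ih =>
      intro t; rw [pvMerge]
      by_cases h : t = ['-']
      · rw [if_pos h]
        exact le_trans (ih ('-' :: u)) (by simp)
      · rw [if_neg h]

-- the main loop: for t in tokens: <merge>; <flush pending>; pending = t, then append pending.
-- the 'none' branch at the end corresponds to an empty token list, unreachable (split never
-- returns an empty list).
def pvAltLoop (toks : List (List Char)) (pending : Option (List Char))
    (aux : List (List Char)) (pos : List Int) : List (List Char) × List Int :=
  match toks with
  | [] =>
    match pending with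
    | some p => (aux ++ [p], pos)
    | none => (aux, pos)
  | t0 :: rest =>
    let m := pvMerge t0 rest
    match pending with
    | some p =>
      if 3 ≤ p.length then
        pvAltLoop m.2 (some m.1)
          (aux ++ [PySem.List.slice p none (some (-2))])
          (pos ++ [(PySem.Int.ofChars? (PySem.List.slice p (some (-1)) none)).getD 0])
      else pvAltLoop m.2 (some m.1) aux pos
    | none => pvAltLoop m.2 (some m.1) aux pos
termination_by toks.length
decreasing_by
  all_goals simp only [List.length_cons]
  all_goals exact Nat.lt_succ_of_le (pvMerge_length rest t0)

def calc_restricao_alt (restr : String) : List String × List Int :=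
  let toks := PySem.Chars.splitOn restr.toList [' ']
  let r := pvAltLoop toks none [] []
  (r.1.map String.ofList, r.2)

-- ===== PRECONDITION & SPEC =====
-- helpers for Pre_: the token list, and the effective token at index i after A's in-place sign
-- propagation: a '-' is prepended at i exactly when, just before i, the maximal run of tokens
-- that are '' or '-' contains an odd number of '-' tokens (a closed-form parity condition).
def pvTok (restr : String) : List (List Char) := PySem.Chars.splitOn restr.toList [' ']
def pvCarryAt (toks : List (List Char)) (i : Nat) : Bool :=
  (((toks.take i).reverse.takeWhile (fun t => t == [] || t == ['-'])).count ['-']) % 2 == 1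
def pvEffAt (toks : List (List Char)) (i : Nat) : List Char :=
  if pvCarryAt toks i then '-' :: toks.getD i [] else toks.getD i []

-- Pre_ excludes exactly the inputs on which Python A raises: IndexError when the effective last
-- token is '-', and ValueError when an effective non-last token of length ≥ 3 ends in a non-digit.
def Pre_calc_restricao (restr : String) : Prop :=
  pvEffAt (pvTok restr) ((pvTok restr).length - 1) ≠ ['-'] ∧
  ∀ i, i < (pvTok restr).length - 1 → 3 ≤ (pvEffAt (pvTok restr) i).length →
    ((pvEffAt (pvTok restr) i).getLast?.any Char.isDigit) = true
instance (restr : String) : Decidable (Pre_calc_restricao restr) := by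
  unfold Pre_calc_restricao; infer_instance

def pvWitness_calc_restricao : String := "2x1 + 3x2 <= 10"

def Spec_calc_restricao (restr : String) (out : List String × List Int) : Prop := out = calc_restricao_alt restr
instance (restr : String) (out : List String × List Int) : Decidable (Spec_calc_restricao restr out) := by unfold Spec_calc_restricao; infer_instance

-- ===== CLAIM (what is proved, stated in full; the proofs are below) =====
def Claim_equal_calc_restricao : Prop := ∀ (restr : String), Dom_calc_restricao restr → Pre_calc_restricao restr → Spec_calc_restricao restr (calc_restricao restr)

-- ===== LEMMAS AND PROOFS =====

-- the effective token list produced by A's first loop, as a one-pass recursion with a carry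
def pvEffL (c : Bool) : List (List Char) → List (List Char)
  | [] => []
  | t0 :: rest =>
    let t := if c then '-' :: t0 else t0
    t :: pvEffL (t == ['-']) rest

theorem getD_append_cons {α : Type} (pre : List α) (x : α) (r : List α) (d : α) :
    (pre ++ x :: r).getD pre.length d = x := by
  simp [List.getD_eq_getElem?_getD]

theorem set_append_cons {α : Type} (pre : List α) (x y : α) (r : List α) :
    (pre ++ x :: r).set pre.length y = pre ++ y :: r := by
  rw [List.set_append_right _ _ (Nat.le_refl _)]
  simp

theorem pvLoop1_spec (rest : List (List Char)) :
    ∀ (t' : List Char) (done : List (List Char)),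
      pvLoop1 (done ++ t' :: rest) done.length = done ++ t' :: pvEffL (t' == ['-']) rest := by
  induction rest with
  | nil =>
      intro t' done
      rw [pvLoop1, dif_pos (by simp)]
      rw [getD_append_cons]
      have hstop : ∀ m : List (List Char), m.length = done.length + 1 →
          pvLoop1 m (done.length + 1) = m := by
        intro m hm; rw [pvLoop1, dif_neg (by omega)]
      by_cases hd : t' = ['-']
      · rw [if_pos hd, List.set_eq_of_length_le (by simp), hstop _ (by simp)]
        simp [pvEffL]
      · rw [if_neg hd, hstop _ (by simp)]
        simp [pvEffL]
  | cons u us ih =>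
      intro t' done
      rw [pvLoop1, dif_pos (by simp)]
      rw [getD_append_cons]
      by_cases hd : t' = ['-']
      · rw [if_pos hd]
        have hg2 : (done ++ t' :: u :: us).getD (done.length + 1) [] = u := by
          have : done ++ t' :: u :: us = (done ++ [t']) ++ u :: us := by simp
          rw [this]
          have hl : done.length + 1 = (done ++ [t']).length := by simp
          rw [hl, getD_append_cons]
        rw [hg2]
        have hs2 : (done ++ t' :: u :: us).set (done.length + 1) ('-' :: u)
            = (done ++ [t']) ++ ('-' :: u) :: us := by
          have : done ++ t' :: u :: us = (done ++ [t']) ++ u :: us := by simp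
          rw [this]
          have hl : done.length + 1 = (done ++ [t']).length := by simp
          rw [hl, set_append_cons]
        rw [hs2]
        have hl : done.length + 1 = (done ++ [t']).length := by simp
        rw [hl, ih ('-' :: u) (done ++ [t'])]
        simp [pvEffL, hd]
      · rw [if_neg hd]
        have hre : done ++ t' :: u :: us = (done ++ [t']) ++ u :: us := by simp
        rw [hre]
        have hl : done.length + 1 = (done ++ [t']).length := by simp
        rw [hl, ih u (done ++ [t'])]
        simp [pvEffL, hd]

theorem length_pvEffL (c : Bool) (l : List (List Char)) : (pvEffL c l).length = l.length := by
  induction l generalizing c with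
  | nil => simp [pvEffL]
  | cons t ts ih => simp [pvEffL, ih]

-- the contents of the two arrays after A's second loop
def pvAux2 : List (List Char) → List (Option (List Char))
  | [] => []
  | [t] => [some t]
  | t :: u :: us => (if 3 ≤ t.length then some t else none) :: pvAux2 (u :: us)
def pvPos2 : List (List Char) → List (Option Int)
  | [] => []
  | [_] => [none]
  | t :: u :: us => (if 3 ≤ t.length then some (pvCalcPos t) else none) :: pvPos2 (u :: us)

theorem length_pvAux2 (l : List (List Char)) : (pvAux2 l).length = l.length := by
  induction l with
  | nil => simp [pvAux2]
  | cons t ts ih => cases ts <;> simp_all [pvAux2]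

theorem pvLoop2_spec (rest : List (List Char)) :
    ∀ (pre : List (List Char)) (auxd : List (Option (List Char))) (posd : List (Option Int)),
      rest ≠ [] → auxd.length = pre.length → posd.length = pre.length →
      pvLoop2 (pre ++ rest) (pre.length + rest.length) pre.length
        (auxd ++ List.replicate rest.length none) (posd ++ List.replicate rest.length none)
        = (auxd ++ pvAux2 rest, posd ++ pvPos2 rest) := by
  induction rest with
  | nil => intro _ _ _ h; exact absurd rfl h
  | cons t ts ih =>
      intro pre auxd posd _ ha hp
      rw [pvLoop2, dif_pos (by simp only [List.length_cons]; omega)]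
      simp only [getD_append_cons]
      cases ts with
      | nil =>
          rw [if_pos (by simp only [List.length_cons, List.length_nil]; omega)]
          have hsa : (auxd ++ List.replicate ([t] : List (List Char)).length none).set pre.length (some t)
              = auxd ++ [some t] := by
            simp only [List.length_cons, List.length_nil, List.replicate_succ, List.replicate_zero]
            rw [← ha, set_append_cons]
          rw [hsa]
          simp [pvAux2, pvPos2]
      | cons u us =>
          rw [if_neg (by simp only [List.length_cons]; omega)]
          have hra : List.replicate (t :: u :: us).length (none : Option (List Char))
              = none :: List.replicate (u :: us).length none := by
            simp [List.replicate_succ]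
          have hrp : List.replicate (t :: u :: us).length (none : Option Int)
              = none :: List.replicate (u :: us).length none := by
            simp [List.replicate_succ]
          have hre : pre ++ t :: u :: us = (pre ++ [t]) ++ u :: us := by simp
          have hlen : pre.length + (t :: u :: us).length = (pre ++ [t]).length + (u :: us).length := by
            simp; omega
          have hi : pre.length + 1 = (pre ++ [t]).length := by simp
          by_cases h3 : 3 ≤ t.length
          · rw [if_pos h3]
            have hsa : (auxd ++ List.replicate (t :: u :: us).length none).set pre.length (some t)
                = (auxd ++ [some t]) ++ List.replicate (u :: us).length none := by
              rw [hra, ← ha, set_append_cons]; simp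
            have hsp : (posd ++ List.replicate (t :: u :: us).length none).set pre.length (some (pvCalcPos t))
                = (posd ++ [some (pvCalcPos t)]) ++ List.replicate (u :: us).length none := by
              rw [hrp, ← hp, set_append_cons]; simp
            rw [hsa, hsp, hre, hlen, hi,
              ih (pre ++ [t]) (auxd ++ [some t]) (posd ++ [some (pvCalcPos t)])
                (by simp) (by simp [ha]) (by simp [hp])]
            simp [pvAux2, pvPos2, h3]
          · rw [if_neg h3]
            have hsa : auxd ++ List.replicate (t :: u :: us).length (none : Option (List Char))
                = (auxd ++ [none]) ++ List.replicate (u :: us).length none := by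
              rw [hra]; simp
            have hsp : posd ++ List.replicate (t :: u :: us).length (none : Option Int)
                = (posd ++ [none]) ++ List.replicate (u :: us).length none := by
              rw [hrp]; simp
            rw [hsa, hsp, hre, hlen, hi,
              ih (pre ++ [t]) (auxd ++ [none]) (posd ++ [none])
                (by simp) (by simp [ha]) (by simp [hp])]
            simp [pvAux2, pvPos2, h3]

-- the array contents after A's third loop
def pvAux3 : List (Option (List Char)) → List (Option (List Char))
  | [] => []
  | [o] => [o]
  | o :: u :: us =>
      (o.map (fun s => PySem.List.slice s none (some ((s.length : Int) - 2)))) :: pvAux3 (u :: us)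

theorem pvLoop3_spec (rest : List (Option (List Char))) :
    ∀ (pre : List (Option (List Char))), rest ≠ [] →
      pvLoop3 (pre.length + rest.length) pre.length (pre ++ rest) = pre ++ pvAux3 rest := by
  induction rest with
  | nil => intro _ h; exact absurd rfl h
  | cons o ts ih =>
      intro pre _
      rw [pvLoop3, dif_pos (by simp only [List.length_cons]; omega)]
      cases ts with
      | nil =>
          rw [if_pos (by simp only [List.length_cons, List.length_nil]; omega)]
          simp [pvAux3]
      | cons u us =>
          rw [if_neg (by simp only [List.length_cons]; omega)]
          simp only [getD_append_cons]
          have hlen : pre.length + (o :: u :: us).length = (pre ++ [o]).length + (u :: us).length := by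
            simp; omega
          cases o with
          | none =>
              dsimp only
              have hre : pre ++ (none : Option (List Char)) :: u :: us
                  = (pre ++ [none]) ++ u :: us := by simp
              have hi : pre.length + 1 = (pre ++ [(none : Option (List Char))]).length := by simp
              rw [hre, hlen, hi, ih (pre ++ [none]) (by simp)]
              simp [pvAux3]
          | some s =>
              dsimp only
              have hset : (pre ++ some s :: u :: us).set pre.length
                  (some (PySem.List.slice s none (some ((s.length : Int) - 2))))
                  = (pre ++ [some (PySem.List.slice s none (some ((s.length : Int) - 2)))]) ++ u :: us := by
                rw [set_append_cons]; simp
              have hi : pre.length + 1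
                  = (pre ++ [some (PySem.List.slice s none (some ((s.length : Int) - 2)))]).length := by simp
              rw [hset]
              have hlen2 : pre.length + (some s :: u :: us).length
                  = (pre ++ [some (PySem.List.slice s none (some ((s.length : Int) - 2)))]).length + (u :: us).length := by
                simp; omega
              rw [hlen2, hi, ih _ (by simp)]
              simp [pvAux3]

-- both ports' outputs as functions of the effective token list
def pvBA : List (List Char) → List (List Char)
  | [] => []
  | [t] => [t]
  | t :: u :: us => (if 3 ≤ t.length then [PySem.List.slice t none (some (-2))] else []) ++ pvBA (u :: us)
def pvBP : List (List Char) → List Int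
  | [] => []
  | [_] => []
  | t :: u :: us =>
      (if 3 ≤ t.length then [(PySem.Int.ofChars? (PySem.List.slice t (some (-1)) none)).getD 0] else [])
        ++ pvBP (u :: us)

-- the two slice forms agree on tokens of length ≥ 3
theorem slice_take_eq (t : List Char) (h3 : 3 ≤ t.length) :
    PySem.List.slice t none (some ((t.length : Int) - 2)) = PySem.List.slice t none (some (-2)) := by
  rw [PySem.List.slice_to_neg_ofNat t 2 (by omega)]
  have h2 : ((t.length : Int) - 2) = ((t.length - 2 : Nat) : Int) := by omega
  rw [h2, PySem.List.slice_to_natCast]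

theorem slice_drop_eq (t : List Char) (h3 : 3 ≤ t.length) :
    PySem.List.slice t (some ((t.length : Int) - 1)) none = PySem.List.slice t (some (-1)) none := by
  rw [PySem.List.slice_from_neg_one]
  have h1 : ((t.length : Int) - 1) = ((t.length - 1 : Nat) : Int) := by omega
  rw [h1, PySem.List.slice_from_natCast]

theorem pvAux2_cons₂ (t u : List Char) (us : List (List Char)) :
    pvAux2 (t :: u :: us) = (if 3 ≤ t.length then some t else none) :: pvAux2 (u :: us) := rfl

theorem pvAux3_cons₂ (o p : Option (List Char)) (ps : List (Option (List Char))) :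
    pvAux3 (o :: p :: ps)
      = (o.map (fun s => PySem.List.slice s none (some ((s.length : Int) - 2)))) :: pvAux3 (p :: ps) := rfl

theorem filterMap_pvAux3 (E : List (List Char)) :
    (pvAux3 (pvAux2 E)).filterMap id = pvBA E := by
  induction E with
  | nil => simp [pvAux2, pvAux3, pvBA]
  | cons t ts ih =>
      cases ts with
      | nil => simp [pvAux2, pvAux3, pvBA]
      | cons u us =>
          obtain ⟨y, ys, hy⟩ : ∃ y ys, pvAux2 (u :: us) = y :: ys := by
            cases us <;> exact ⟨_, _, rfl⟩
          rw [pvAux2_cons₂, hy, pvAux3_cons₂, ← hy]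
          by_cases h3 : 3 ≤ t.length
          · rw [if_pos h3]
            simp [pvBA, h3, slice_take_eq t h3]
            exact ih
          · rw [if_neg h3]
            simp [pvBA, h3]
            exact ih

theorem filterMap_pvPos2 (E : List (List Char)) :
    (pvPos2 E).filterMap id = pvBP E := by
  induction E with
  | nil => simp [pvPos2, pvBP]
  | cons t ts ih =>
      cases ts with
      | nil => simp [pvPos2, pvBP]
      | cons u us =>
          by_cases h3 : 3 ≤ t.length
          · simp only [pvPos2, if_pos h3, List.filterMap_cons, id]
            simp [pvBP, h3, pvCalcPos, slice_drop_eq t h3]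
            exact ih
          · simp only [pvPos2, if_neg h3, List.filterMap_cons, id]
            simp [pvBP, h3]
            exact ih

-- ===== B-side lemmas: the merge-and-stream loop also computes (pvBA eff, pvBP eff) =====

theorem pvMerge_nil (t : List Char) : pvMerge t [] = (t, []) := by
  rw [pvMerge]; by_cases h : t = ['-'] <;> simp [h]

theorem pvMerge_exhaust (rest : List (List Char)) :
    ∀ t, (pvMerge t rest).1 = ['-'] → (pvMerge t rest).2 = [] := by
  induction rest with
  | nil => intro t _; rw [pvMerge_nil]
  | cons u us ih =>
      intro t h
      by_cases ht : t = ['-']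
      · rw [pvMerge, if_pos ht] at h ⊢
        exact ih ('-' :: u) h
      · rw [pvMerge, if_neg ht] at h
        exact absurd h ht

theorem pvEffL_cons (c : Bool) (t0 : List Char) (rest : List (List Char)) :
    pvEffL c (t0 :: rest) =
      (if c then '-' :: t0 else t0) :: pvEffL ((if c then '-' :: t0 else t0) == ['-']) rest := rfl

-- the merged token heads a suffix of the effective token list: the absorbed run shows up as
-- leading '-' entries (which never contribute to the output)
theorem pvMerge_effL (rest : List (List Char)) :
    ∀ t, ∃ k, t :: pvEffL (t == ['-']) rest
      = List.replicate k ['-'] ++ (pvMerge t rest).1 :: pvEffL ((pvMerge t rest).1 == ['-']) (pvMerge t rest).2 := by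
  induction rest with
  | nil => intro t; exact ⟨0, by simp [pvMerge_nil]⟩
  | cons u us ih =>
      intro t
      by_cases ht : t = ['-']
      · rw [pvMerge, if_pos ht]
        obtain ⟨k, hk⟩ := ih ('-' :: u)
        refine ⟨k + 1, ?_⟩
        subst ht
        rw [pvEffL_cons]
        simp only [List.replicate_succ, List.cons_append, beq_self_eq_true, if_true]
        rw [hk]
      · rw [pvMerge, if_neg ht]
        exact ⟨0, rfl⟩

theorem pvBA_skip_minus (k : Nat) (x : List Char) (l : List (List Char)) :
    pvBA (List.replicate k ['-'] ++ x :: l) = pvBA (x :: l) := by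
  induction k with
  | zero => rfl
  | succ k ih =>
      obtain ⟨y, ys, hy⟩ : ∃ y ys, List.replicate k (['-'] : List Char) ++ x :: l = y :: ys := by
        cases k <;> exact ⟨_, _, rfl⟩
      rw [List.replicate_succ, List.cons_append, hy]
      show (if 3 ≤ (['-'] : List Char).length then _ else []) ++ pvBA (y :: ys) = _
      rw [← hy, ih]
      simp

theorem pvBP_skip_minus (k : Nat) (x : List Char) (l : List (List Char)) :
    pvBP (List.replicate k ['-'] ++ x :: l) = pvBP (x :: l) := by
  induction k with
  | zero => rfl
  | succ k ih =>
      obtain ⟨y, ys, hy⟩ : ∃ y ys, List.replicate k (['-'] : List Char) ++ x :: l = y :: ys := by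
        cases k <;> exact ⟨_, _, rfl⟩
      rw [List.replicate_succ, List.cons_append, hy]
      show (if 3 ≤ (['-'] : List Char).length then _ else []) ++ pvBP (y :: ys) = _
      rw [← hy, ih]
      simp

-- effective-list tail of the merged state: carry after a merged token is always false
theorem pvMerge_eff_tail (t0 : List Char) (rest : List (List Char)) :
    pvEffL ((pvMerge t0 rest).1 == ['-']) (pvMerge t0 rest).2
      = pvEffL false (pvMerge t0 rest).2 := by
  by_cases h : (pvMerge t0 rest).1 = ['-']
  · rw [pvMerge_exhaust rest t0 h]; simp [pvEffL]
  · have hb : ((pvMerge t0 rest).1 == ['-']) = false := beq_eq_false_iff_ne.mpr h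
    rw [hb]

theorem pvBA_cons (p : List Char) (y : List Char) (ys : List (List Char)) :
    pvBA (p :: y :: ys)
      = (if 3 ≤ p.length then [PySem.List.slice p none (some (-2))] else []) ++ pvBA (y :: ys) := rfl

theorem pvBP_cons (p : List Char) (y : List Char) (ys : List (List Char)) :
    pvBP (p :: y :: ys)
      = (if 3 ≤ p.length then [(PySem.Int.ofChars? (PySem.List.slice p (some (-1)) none)).getD 0] else [])
        ++ pvBP (y :: ys) := rfl

theorem pvAltLoop_spec (N : Nat) :
    ∀ (toks : List (List Char)), toks.length ≤ N → ∀ (p : List Char) aux pos,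
      pvAltLoop toks (some p) aux pos
        = (aux ++ pvBA (p :: pvEffL false toks), pos ++ pvBP (p :: pvEffL false toks)) := by
  induction N with
  | zero =>
      intro toks h p aux pos
      have : toks = [] := List.eq_nil_of_length_eq_zero (by omega)
      subst this
      simp [pvAltLoop, pvEffL, pvBA, pvBP]
  | succ N ih =>
      intro toks h p aux pos
      cases toks with
      | nil => simp [pvAltLoop, pvEffL, pvBA, pvBP]
      | cons t0 rest =>
          obtain ⟨k, hk⟩ := pvMerge_effL rest t0
          rw [pvMerge_eff_tail] at hk
          have hstep : pvAltLoop (t0 :: rest) (some p) aux pos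
              = pvAltLoop (pvMerge t0 rest).2 (some (pvMerge t0 rest).1)
                  (aux ++ (if 3 ≤ p.length then [PySem.List.slice p none (some (-2))] else []))
                  (pos ++ (if 3 ≤ p.length then
                    [(PySem.Int.ofChars? (PySem.List.slice p (some (-1)) none)).getD 0] else [])) := by
            rw [pvAltLoop]
            by_cases h3 : 3 ≤ p.length <;> simp [h3]
          have hr : (pvMerge t0 rest).2.length ≤ N :=
            le_trans (pvMerge_length rest t0) (by simp only [List.length_cons] at h; omega)
          rw [hstep, ih _ hr]
          have hE : pvEffL false (t0 :: rest) = t0 :: pvEffL (t0 == ['-']) rest := by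
            simp [pvEffL_cons]
          obtain ⟨y, ys, hy⟩ : ∃ y ys,
              List.replicate k (['-'] : List Char)
                ++ (pvMerge t0 rest).1 :: pvEffL false (pvMerge t0 rest).2 = y :: ys := by
            cases k <;> exact ⟨_, _, rfl⟩
          rw [hE, hk, hy, pvBA_cons, pvBP_cons, ← hy, pvBA_skip_minus, pvBP_skip_minus]
          simp [List.append_assoc]

theorem pvAltLoop_top (a : List Char) (l : List (List Char)) :
    pvAltLoop (a :: l) none [] [] = (pvBA (pvEffL false (a :: l)), pvBP (pvEffL false (a :: l))) := by
  have hstep : pvAltLoop (a :: l) none [] []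
      = pvAltLoop (pvMerge a l).2 (some (pvMerge a l).1) [] [] := by
    rw [pvAltLoop]
  rw [hstep, pvAltLoop_spec (pvMerge a l).2.length _ le_rfl]
  obtain ⟨k, hk⟩ := pvMerge_effL l a
  rw [pvMerge_eff_tail] at hk
  have hE : pvEffL false (a :: l) = a :: pvEffL (a == ['-']) l := by
    simp [pvEffL_cons]
  rw [hE, hk, pvBA_skip_minus, pvBP_skip_minus]
  simp

theorem main_eq (restr : String) : calc_restricao restr = calc_restricao_alt restr := by
  unfold calc_restricao calc_restricao_alt
  generalize PySem.Chars.splitOn restr.toList [' '] = L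
  cases L with
  | nil =>
      simp [pvLoop1, pvLoop2, pvLoop3, pvAltLoop]
  | cons a l =>
      have h1 : pvLoop1 (a :: l) 0 = pvEffL false (a :: l) := by
        have := pvLoop1_spec l a []
        simpa [pvEffL] using this
      have hEne : pvEffL false (a :: l) ≠ [] := by simp [pvEffL]
      have hlen : (a :: l).length = (pvEffL false (a :: l)).length := (length_pvEffL false (a :: l)).symm
      have h2 := pvLoop2_spec (pvEffL false (a :: l)) [] [] [] hEne rfl rfl
      simp only [List.nil_append, List.length_nil, Nat.zero_add] at h2
      have h3pre := pvLoop3_spec (pvAux2 (pvEffL false (a :: l))) [] (by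
        cases hE : pvEffL false (a :: l) with
        | nil => exact absurd hE hEne
        | cons e es => cases es <;> simp [pvAux2])
      simp only [List.nil_append, List.length_nil, Nat.zero_add] at h3pre
      simp only [h1, hlen, h2, filterMap_pvPos2, pvAltLoop_top]
      rw [← length_pvAux2 (pvEffL false (a :: l)), h3pre, filterMap_pvAux3]

-- ===== VERDICT (by name: the statement is the Claim_ definition above) =====
theorem calc_restricao_spec : Claim_equal_calc_restricao := by
  intro restr _ _
  unfold Spec_calc_restricao
  exact main_eq restr
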